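-- pv_equiv track=rewrite | github.com/shivanshmudgal/PathPilot | app.py | calculate_gap
-- ===== SOURCE A (Python) =====
-- def calculate_gap(detected_skills, required_skills_map):
--     """
--     Compare detected skills against required skills.
--     Returns list of missing skills (only weight >= 2 are considered critical).
--     """
--     detected_lower = [s.lower() for s in detected_skills]
--     missing = []
--     for skill, weight in required_skills_map.items():
--         skill_lower = skill.lower()
--         matched = any(
--             skill_lower in d or d in skill_lower or
--             skill_lower.split()[0] in d  # partial match on first word
--             for d in detected_lower
--         )
--         if not matched and weight >= 2:
--             missing.append(skill)
--     return missing
-- ===== SOURCE B (Python) =====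
-- def calculate_gap(detected_skills, required_skills_map):
--     """
--     Compare detected skills against required skills.
--     Returns list of missing skills (only weight >= 2 are considered critical).
--     """
--     detected_lower = [s.lower() for s in detected_skills]
--     matched = set()
--     for d in detected_lower:
--         for skill in required_skills_map:
--             if skill not in matched:
--                 sl = skill.lower()
--                 parts = sl.split()
--                 if sl in d or d in sl or (parts and parts[0] in d):
--                     matched.add(skill)
--     return [skill for skill, weight in required_skills_map.items()
--             if weight >= 2 and skill not in matched]
-- ===== Notes on version B (the rewrite author's own statement) =====
-- stated objective: alternative
-- what changed: Inverted the nested passes: instead of a per-required-skill any() scan over the detected skills, B makes one accumulation pass over the detected skills marking matched required names into a set, then a single filter over the required map keeps unmatched skills of weight >= 2.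
import Mathlib
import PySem

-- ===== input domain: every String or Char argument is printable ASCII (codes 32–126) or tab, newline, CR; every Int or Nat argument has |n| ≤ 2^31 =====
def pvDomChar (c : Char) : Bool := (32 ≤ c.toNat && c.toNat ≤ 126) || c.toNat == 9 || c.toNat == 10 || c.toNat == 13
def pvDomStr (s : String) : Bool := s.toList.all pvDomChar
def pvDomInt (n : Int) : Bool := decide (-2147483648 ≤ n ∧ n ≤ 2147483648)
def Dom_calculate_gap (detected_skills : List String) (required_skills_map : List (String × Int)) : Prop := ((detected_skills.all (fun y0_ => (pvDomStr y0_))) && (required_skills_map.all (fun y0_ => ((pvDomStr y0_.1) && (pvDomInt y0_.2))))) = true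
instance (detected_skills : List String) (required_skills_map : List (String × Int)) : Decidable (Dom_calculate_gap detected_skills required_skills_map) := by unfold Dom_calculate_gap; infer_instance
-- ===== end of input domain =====

-- B inverts the nested passes: one accumulation pass over the detected skills builds a 'matched' set
-- of required-skill names, then a single filter over the required map keeps the heavy unmatched ones
-- (objective: alternative decomposition; B also returns instead of raising on all-whitespace skills).

-- ===== PORT A =====
def calculate_gap (detected_skills : List String) (required_skills_map : List (String × Int)) : List String :=
  let detected_lower := detected_skills.map PySem.Str.lower
  ((PySem.Dict.ofList required_skills_map).items).foldl
    (fun missing p =>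
      let skill_lower := PySem.Str.lower p.1
      let matched := detected_lower.any (fun d =>
        PySem.Str.isIn skill_lower d || PySem.Str.isIn d skill_lower ||
        -- skill_lower.split()[0]: Python raises IndexError when the split is empty; Pre_ excludes
        -- exactly the inputs on which that subterm is reached with an empty split
        PySem.Str.isIn (PySem.List.pyGetD (PySem.Str.split₀ skill_lower) 0 "") d)
      if !matched && decide (2 ≤ p.2) then missing ++ [p.1] else missing)
    []

-- ===== PORT B =====
def calculate_gap_alt (detected_skills : List String) (required_skills_map : List (String × Int)) : List String :=
  let detected_lower := detected_skills.map PySem.Str.lower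
  let rd := PySem.Dict.ofList required_skills_map
  let matched : PySem.Set String :=
    detected_lower.foldl
      (fun m d =>
        rd.keys.foldl
          (fun m skill =>
            if m.contains skill then m
            else
              let sl := PySem.Str.lower skill
              let parts := PySem.Str.split₀ sl
              if PySem.Str.isIn sl d || PySem.Str.isIn d sl ||
                 (!parts.isEmpty && PySem.Str.isIn (PySem.List.pyGetD parts 0 "") d)
              then PySem.Set.add m skill else m)
          m)
      PySem.Set.empty
  (rd.items.filter (fun p => decide (2 ≤ p.2) && !(PySem.Set.contains matched p.1))).map (fun p => p.1)

-- ===== PRECONDITION & SPEC =====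
-- Pre_ excludes exactly the inputs on which A raises IndexError: a required skill whose lowercase
-- form splits to no words (empty/whitespace-only) while the first detected skill fails both
-- substring tests, so 'skill_lower.split()[0]' is evaluated on an empty list.
def Pre_calculate_gap (detected_skills : List String) (required_skills_map : List (String × Int)) : Prop :=
  ∀ p ∈ (PySem.Dict.ofList required_skills_map).items,
    PySem.Str.split₀ (PySem.Str.lower p.1) ≠ [] ∨
    ∀ d0 ∈ detected_skills.head?,
      (PySem.Str.isIn (PySem.Str.lower p.1) (PySem.Str.lower d0) ||
       PySem.Str.isIn (PySem.Str.lower d0) (PySem.Str.lower p.1)) = true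
instance (detected_skills : List String) (required_skills_map : List (String × Int)) : Decidable (Pre_calculate_gap detected_skills required_skills_map) := by unfold Pre_calculate_gap; infer_instance

def pvWitness_calculate_gap : List String × (List (String × Int)) :=
  (["Python", "docker"], [("python", 3), ("sql", 2), ("docker swarm", 1)])

def Spec_calculate_gap (detected_skills : List String) (required_skills_map : List (String × Int)) (out : List String) : Prop := out = calculate_gap_alt detected_skills required_skills_map
instance (detected_skills : List String) (required_skills_map : List (String × Int)) (out : List String) : Decidable (Spec_calculate_gap detected_skills required_skills_map out) := by unfold Spec_calculate_gap; infer_instance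

-- ===== CLAIM (what is proved, stated in full; the proofs are below) =====
def Claim_equal_calculate_gap : Prop := ∀ (detected_skills : List String) (required_skills_map : List (String × Int)), Dom_calculate_gap detected_skills required_skills_map → Pre_calculate_gap detected_skills required_skills_map → Spec_calculate_gap detected_skills required_skills_map (calculate_gap detected_skills required_skills_map)


-- ===== LEMMAS AND PROOFS =====

-- A's per-pair fuzzy test (the total port form: split()[0] read with a default)
def testA (skill d : String) : Bool :=
  PySem.Str.isIn (PySem.Str.lower skill) d || PySem.Str.isIn d (PySem.Str.lower skill) ||
  PySem.Str.isIn (PySem.List.pyGetD (PySem.Str.split₀ (PySem.Str.lower skill)) 0 "") d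

-- B's per-pair fuzzy test (first-word clause guarded)
def testB (skill d : String) : Bool :=
  PySem.Str.isIn (PySem.Str.lower skill) d || PySem.Str.isIn d (PySem.Str.lower skill) ||
  (!(PySem.Str.split₀ (PySem.Str.lower skill)).isEmpty &&
   PySem.Str.isIn (PySem.List.pyGetD (PySem.Str.split₀ (PySem.Str.lower skill)) 0 "") d)

theorem mem_innerFold (d : String) (ks : List String) (m : PySem.Set String) (x : String) :
    x ∈ ks.foldl
        (fun m skill => if PySem.Set.contains m skill then m
                        else if testB skill d then PySem.Set.add m skill else m) m
      ↔ x ∈ m ∨ (x ∈ ks ∧ testB x d = true) := by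
  induction ks generalizing m with
  | nil => simp
  | cons k ks ih =>
    rw [List.foldl_cons]
    by_cases hc : PySem.Set.contains m k = true
    · rw [if_pos hc, ih]
      have hkm : k ∈ m := (PySem.Set.contains_iff m k).mp hc
      simp only [List.mem_cons]
      constructor
      · rintro (h | ⟨h1, h2⟩)
        · exact Or.inl h
        · exact Or.inr ⟨Or.inr h1, h2⟩
      · rintro (h | ⟨rfl | h1, h2⟩)
        · exact Or.inl h
        · exact Or.inl hkm
        · exact Or.inr ⟨h1, h2⟩
    · rw [if_neg hc]
      by_cases ht : testB k d = true
      · rw [if_pos ht, ih]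
        simp only [PySem.Set.mem_add, List.mem_cons]
        constructor
        · rintro ((h | rfl) | ⟨h1, h2⟩)
          · exact Or.inl h
          · exact Or.inr ⟨Or.inl rfl, ht⟩
          · exact Or.inr ⟨Or.inr h1, h2⟩
        · rintro (h | ⟨rfl | h1, h2⟩)
          · exact Or.inl (Or.inl h)
          · exact Or.inl (Or.inr rfl)
          · exact Or.inr ⟨h1, h2⟩
      · rw [if_neg ht, ih]
        simp only [List.mem_cons]
        constructor
        · rintro (h | ⟨h1, h2⟩)
          · exact Or.inl h
          · exact Or.inr ⟨Or.inr h1, h2⟩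
        · rintro (h | ⟨rfl | h1, h2⟩)
          · exact Or.inl h
          · exact absurd h2 ht
          · exact Or.inr ⟨h1, h2⟩

theorem mem_outerFold (dl ks : List String) (m : PySem.Set String) (x : String) :
    x ∈ dl.foldl
        (fun m d => ks.foldl
          (fun m skill => if PySem.Set.contains m skill then m
                          else if testB skill d then PySem.Set.add m skill else m) m) m
      ↔ x ∈ m ∨ (x ∈ ks ∧ ∃ d ∈ dl, testB x d = true) := by
  induction dl generalizing m with
  | nil => simp
  | cons d dl ih =>
    rw [List.foldl_cons, ih, mem_innerFold]
    simp only [List.mem_cons]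
    constructor
    · rintro ((h | ⟨h1, h2⟩) | ⟨h1, dd, hd, ht⟩)
      · tauto
      · exact Or.inr ⟨h1, d, Or.inl rfl, h2⟩
      · exact Or.inr ⟨h1, dd, Or.inr hd, ht⟩
    · rintro (h | ⟨h1, dd, (rfl | hd), ht⟩) <;> tauto

theorem testA_eq_testB_of_split_ne (x : String)
    (h : PySem.Str.split₀ (PySem.Str.lower x) ≠ []) (d : String) : testA x d = testB x d := by
  unfold testA testB
  cases hs : PySem.Str.split₀ (PySem.Str.lower x) with
  | nil => exact absurd hs h
  | cons a t => simp

theorem testA_true_of_split_nil (x : String)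
    (h : PySem.Str.split₀ (PySem.Str.lower x) = []) (d : String) : testA x d = true := by
  unfold testA
  rw [h]
  have h0 : PySem.List.pyGetD ([] : List String) 0 "" = "" := rfl
  rw [h0]
  have h1 : PySem.Str.isIn "" d = true := by
    rw [PySem.Str.isIn_eq]
    exact PySem.Chars.isIn_nil d.toList
  rw [h1, Bool.or_true]

-- ===== VERDICT (by name: the statement is the Claim_ definition above) =====
theorem calculate_gap_spec : Claim_equal_calculate_gap := by
  intro ds rm _ hpre
  unfold Spec_calculate_gap calculate_gap calculate_gap_alt
  simp only
  rw [show (fun (missing : List String) (p : String × Int) =>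
        if (!(ds.map PySem.Str.lower).any (fun d =>
              PySem.Str.isIn (PySem.Str.lower p.1) d || PySem.Str.isIn d (PySem.Str.lower p.1) ||
              PySem.Str.isIn (PySem.List.pyGetD (PySem.Str.split₀ (PySem.Str.lower p.1)) 0 "") d)
            && decide (2 ≤ p.2)) = true
        then missing ++ [p.1] else missing)
      = (fun missing p =>
        if (!(ds.map PySem.Str.lower).any (testA p.1) && decide (2 ≤ p.2)) = true
        then missing ++ [p.1] else missing) from rfl]
  rw [show (fun (m : PySem.Set String) (d : String) =>
        List.foldl (fun m skill =>
          if PySem.Set.contains m skill then m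
          else
            if PySem.Str.isIn (PySem.Str.lower skill) d || PySem.Str.isIn d (PySem.Str.lower skill) ||
               (!(PySem.Str.split₀ (PySem.Str.lower skill)).isEmpty &&
                PySem.Str.isIn (PySem.List.pyGetD (PySem.Str.split₀ (PySem.Str.lower skill)) 0 "") d)
            then PySem.Set.add m skill else m) m (PySem.Dict.ofList rm).keys)
      = (fun m d => List.foldl (fun m skill =>
          if PySem.Set.contains m skill then m
          else if testB skill d then PySem.Set.add m skill else m) m (PySem.Dict.ofList rm).keys)
      from rfl]
  rw [PySem.List.foldl_append_if
        (fun p : String × Int => !(ds.map PySem.Str.lower).any (testA p.1) && decide (2 ≤ p.2))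
        (fun p : String × Int => p.1)]
  rw [List.nil_append]
  congr 1
  apply List.filter_congr
  intro p hp
  have hkey : p.1 ∈ (PySem.Dict.ofList rm).keys := PySem.Dict.mem_keys_of_mem_items _ hp
  have hmem : PySem.Set.contains
      ((ds.map PySem.Str.lower).foldl
        (fun m d => (PySem.Dict.ofList rm).keys.foldl
          (fun m skill => if PySem.Set.contains m skill then m
                          else if testB skill d then PySem.Set.add m skill else m) m)
        PySem.Set.empty) p.1
      = (ds.map PySem.Str.lower).any (testB p.1) := by
    rw [Bool.eq_iff_iff, PySem.Set.contains_iff, mem_outerFold, List.any_eq_true]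
    simp only [PySem.Set.empty]
    constructor
    · rintro (h | ⟨_, dd, hd, ht⟩)
      · simp at h
      · exact ⟨dd, hd, ht⟩
    · rintro ⟨dd, hd, ht⟩
      exact Or.inr ⟨hkey, dd, hd, ht⟩
  rw [hmem]
  have hany : (ds.map PySem.Str.lower).any (testA p.1) = (ds.map PySem.Str.lower).any (testB p.1) := by
    rcases hpre p hp with hne | hhead
    · rw [show testA p.1 = testB p.1 from funext (fun d => testA_eq_testB_of_split_ne p.1 hne d)]
    · by_cases hs : PySem.Str.split₀ (PySem.Str.lower p.1) = []
      · cases ds with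
        | nil => rfl
        | cons d0 rest =>
          have h1 : testA p.1 (PySem.Str.lower d0) = true := testA_true_of_split_nil p.1 hs _
          have h2 : testB p.1 (PySem.Str.lower d0) = true := by
            have h3 := hhead d0 rfl
            unfold testB
            rcases Bool.or_eq_true _ _ |>.mp h3 with h | h <;>
              simp only [h, Bool.true_or, Bool.or_true]
          simp only [List.map_cons, List.any_cons, h1, h2, Bool.true_or]
      · rw [show testA p.1 = testB p.1 from funext (fun d => testA_eq_testB_of_split_ne p.1 hs d)]
  rw [hany, Bool.and_comm]
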